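-- pv_equiv track=rewrite | github.com/RobertoCampisi/advent-of-code | 2024/day14p2.py | highest_column_count
-- ===== SOURCE A (Python) =====
-- def highest_column_count(grid):
--     highest_adj_column_counts = [0]*len(grid[0])
--     adjecent_column_counts = [0]*len(grid[0])
--     for row in grid:
--         adjecent_column_counts = [ 0 if b == 0 else a for (a,b) in zip(adjecent_column_counts, row)]
--         adjecent_column_counts = [sum(x) for x in zip(adjecent_column_counts, row)]
--         highest_adj_column_counts = [max(x) for x in zip(highest_adj_column_counts, adjecent_column_counts)]
--     return max(highest_adj_column_counts)
-- ===== SOURCE B (Python) =====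
-- def highest_column_count(grid):
--     best = 0
--     for j in range(len(grid[0])):
--         cur = 0
--         for row in grid:
--             cur = (0 if row[j] == 0 else cur) + row[j]
--             best = max(best, cur)
--     return best
-- ===== Notes on version B (the rewrite author's own statement) =====
-- stated objective: simpler
-- what changed: B traverses column-by-column keeping one scalar running sum and one scalar best, instead of A's row-major pass that rebuilds three whole intermediate lists (two zip/map passes plus a max pass) per row; Pre_ excludes grids with a row shorter than the first row, where A's zip silently truncates the column lists (an accident of the implementation) while B's natural column scan raises IndexError.
-- outside the precondition, e.g. on highest_column_count([[1, 2], [3]]): A returns 4, B raises IndexError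
import Mathlib
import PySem

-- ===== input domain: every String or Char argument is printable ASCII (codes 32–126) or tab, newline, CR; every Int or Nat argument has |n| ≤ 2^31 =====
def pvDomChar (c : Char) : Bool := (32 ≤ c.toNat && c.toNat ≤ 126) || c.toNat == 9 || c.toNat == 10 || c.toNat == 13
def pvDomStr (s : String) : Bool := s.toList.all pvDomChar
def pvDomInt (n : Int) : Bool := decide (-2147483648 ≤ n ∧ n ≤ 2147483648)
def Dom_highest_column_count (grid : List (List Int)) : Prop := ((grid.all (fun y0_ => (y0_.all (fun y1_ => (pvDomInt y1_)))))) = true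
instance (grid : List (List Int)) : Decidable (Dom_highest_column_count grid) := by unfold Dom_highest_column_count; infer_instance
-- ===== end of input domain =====

-- B scans column-by-column with one scalar running sum and one scalar best (simpler, no per-row list rebuilding); equal to A on rectangular grids.

-- ===== PORT A =====
def hccStep (acc : List Int × List Int) (row : List Int) : List Int × List Int :=
  let adj1 := (acc.2.zip row).map (fun p => if p.2 = 0 then 0 else p.1)
  let adj2 := (adj1.zip row).map (fun p => p.1 + p.2)
  let high := (acc.1.zip adj2).map (fun p => max p.1 p.2)
  (high, adj2)

def highest_column_count (grid : List (List Int)) : Int :=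
  let n := ((PySem.List.pyGet? grid 0).getD []).length
  let st := grid.foldl hccStep (List.replicate n 0, List.replicate n 0)
  (PySem.List.max? st.1 (fun x => x)).getD 0

-- ===== PORT B =====
def highest_column_count_alt (grid : List (List Int)) : Int :=
  (PySem.List.pyRange 0 ((((PySem.List.pyGet? grid 0).getD []).length : Int)) 1).foldl
    (fun best j =>
      (grid.foldl (fun (s : Int × Int) row =>
          let v := PySem.List.pyGetD row j 0
          let cur := (if v = 0 then 0 else s.2) + v
          (max s.1 cur, cur)) (best, (0 : Int))).1)
    0

-- ===== PRECONDITION & SPEC =====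
-- Pre_ excludes exactly: the empty grid (A raises IndexError on grid[0]); nonempty grids whose
-- first row is empty (A raises ValueError on max([]), after zip truncates everything to width 0);
-- and grids containing a row SHORTER than the first row, where A's zip silently truncates every
-- column list to the shortest row seen — an accident of the implementation — while B's natural
-- column scan raises IndexError.
def Pre_highest_column_count (grid : List (List Int)) : Prop :=
  grid ≠ [] ∧ grid.headD [] ≠ [] ∧ ∀ r ∈ grid, (grid.headD []).length ≤ r.length
instance (grid : List (List Int)) : Decidable (Pre_highest_column_count grid) := by
  unfold Pre_highest_column_count; infer_instance

def pvWitness_highest_column_count : List (List Int) := [[1, 0], [2, 3]]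

def Spec_highest_column_count (grid : List (List Int)) (out : Int) : Prop := out = highest_column_count_alt grid
instance (grid : List (List Int)) (out : Int) : Decidable (Spec_highest_column_count grid out) := by unfold Spec_highest_column_count; infer_instance

-- ===== CLAIM (what is proved, stated in full; the proofs are below) =====
def Claim_equal_highest_column_count : Prop := ∀ (grid : List (List Int)), Dom_highest_column_count grid → Pre_highest_column_count grid → Spec_highest_column_count grid (highest_column_count grid)

-- ===== LEMMAS AND PROOFS =====

-- per-column step: state = (best-so-far, running sum); v is the cell value
def colStep (p : Int × Int) (v : Int) : Int × Int :=
  let cur := (if v = 0 then 0 else p.2) + v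
  (max p.1 cur, cur)

-- column fold starting from an arbitrary state
def cfold (rows : List (List Int)) (j : Nat) (h a : Int) : Int × Int :=
  rows.foldl (fun p row => colStep p (row.getD j 0)) (h, a)

def lenFold (rows : List (List Int)) (n : Nat) : Nat :=
  rows.foldl (fun m r => min m r.length) n

lemma map_getD_range (xs : List Int) :
    (List.range xs.length).map (fun j => xs.getD j 0) = xs := by
  apply List.ext_getElem
  · simp
  · intro i h1 h2
    simp [List.getD_eq_getElem?_getD, List.getElem?_eq_getElem h2]

lemma getD_replicate_zero (m k : Nat) : (List.replicate m (0 : Int)).getD k 0 = 0 := by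
  simp [List.getD_eq_getElem?_getD, List.getElem?_replicate]
  split <;> rfl

lemma hccStep_eq (high adj r : List Int) (h : high.length = adj.length) :
    hccStep (high, adj) r =
      ((List.range (min high.length r.length)).map
          (fun j => max (high.getD j 0) ((if r.getD j 0 = 0 then 0 else adj.getD j 0) + r.getD j 0)),
       (List.range (min high.length r.length)).map
          (fun j => (if r.getD j 0 = 0 then 0 else adj.getD j 0) + r.getD j 0)) := by
  unfold hccStep
  dsimp only
  rw [Prod.mk.injEq]
  constructor <;>
  · apply List.ext_getElem
    · simp; omega
    · intro i h1 h2
      simp at h1 ⊢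
      simp [h, h1.1, h1.2]

lemma lenFold_le (rows : List (List Int)) (n : Nat) : lenFold rows n ≤ n := by
  induction rows generalizing n with
  | nil => simp [lenFold]
  | cons r rest ih =>
      have := ih (min n r.length)
      simp only [lenFold, List.foldl_cons] at *
      omega

lemma main_char (rows : List (List Int)) (high adj : List Int) (h : high.length = adj.length) :
    rows.foldl hccStep (high, adj)
      = ((List.range (lenFold rows high.length)).map
            (fun j => (cfold rows j (high.getD j 0) (adj.getD j 0)).1),
         (List.range (lenFold rows high.length)).map
            (fun j => (cfold rows j (high.getD j 0) (adj.getD j 0)).2)) := by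
  induction rows generalizing high adj with
  | nil =>
      simp only [List.foldl_nil, lenFold, cfold, Prod.mk.injEq]
      constructor
      · conv_lhs => rw [← map_getD_range high]
      · conv_lhs => rw [← map_getD_range adj]
        rw [h]
  | cons r rest ih =>
      rw [List.foldl_cons, hccStep_eq high adj r h, ih _ _ (by simp)]
      have hle := lenFold_le rest (min high.length r.length)
      have hlen : lenFold (r :: rest) high.length = lenFold rest (min high.length r.length) := by
        simp [lenFold]
      rw [hlen]
      simp only [List.length_map, List.length_range, Prod.mk.injEq]
      constructor <;>
      · apply List.map_congr_left
        intro j hj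
        simp only [List.mem_range] at hj
        have hjm : j < min high.length r.length := lt_of_lt_of_le hj hle
        simp [List.getD_eq_getElem?_getD, hjm, cfold, colStep]

lemma lenFold_rect (rows : List (List Int)) (L : Nat) (h : ∀ r ∈ rows, L ≤ r.length) :
    lenFold rows L = L := by
  induction rows with
  | nil => simp [lenFold]
  | cons r rest ih =>
      have hr : L ≤ r.length := h r (by simp)
      have := ih (fun r hr => h r (by simp [hr]))
      simp only [lenFold, List.foldl_cons, min_eq_left hr] at *
      exact this

lemma cfold_fst_ge (rows : List (List Int)) (j : Nat) (h a : Int) :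
    h ≤ (cfold rows j h a).1 := by
  induction rows generalizing h a with
  | nil => simp [cfold]
  | cons r rest ih =>
      have := ih (max h ((if r.getD j 0 = 0 then 0 else a) + r.getD j 0))
                 ((if r.getD j 0 = 0 then 0 else a) + r.getD j 0)
      simp only [cfold, List.foldl_cons, colStep] at *
      omega

lemma cfold_shift (rows : List (List Int)) (j : Nat) (h a : Int) (hh : 0 ≤ h) :
    (cfold rows j h a).1 = max h (cfold rows j 0 a).1 := by
  induction rows generalizing h a with
  | nil => simp [cfold]; omega
  | cons r rest ih =>
      set v := r.getD j 0 with hv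
      set cur := (if v = 0 then 0 else a) + v with hc
      have h1 := ih (max h cur) cur (by omega)
      have h2 := ih (max 0 cur) cur (by omega)
      simp only [cfold, List.foldl_cons, colStep] at *
      rw [h1, h2]
      omega

-- chain fold of column bests vs pointwise maxima
lemma chain_eq_maxfold (grid : List (List Int)) (l : List Nat) (b : Int) (hb : 0 ≤ b) :
    l.foldl (fun b j => (cfold grid j b 0).1) b
      = l.foldl (fun b j => max b (cfold grid j 0 0).1) b := by
  induction l generalizing b with
  | nil => rfl
  | cons j rest ih =>
      simp only [List.foldl_cons]
      rw [cfold_shift grid j b 0 hb, ih _ (le_trans hb (le_max_left _ _))]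

lemma maxfold_shift (l : List Int) (a b : Int) :
    l.foldl max (max a b) = max a (l.foldl max b) := by
  induction l generalizing b with
  | nil => rfl
  | cons x rest ih =>
      simp only [List.foldl_cons, max_assoc]
      exact ih (max b x)

lemma maxfold_map {α : Type} (f : α → Int) (l : List α) (b : Int) :
    l.foldl (fun b j => max b (f j)) b = (l.map f).foldl max b := by
  induction l generalizing b with
  | nil => rfl
  | cons x rest ih => simp [List.foldl_cons, ih]

-- ===== VERDICT (by name: the statement is the Claim_ definition above) =====
theorem highest_column_count_spec : Claim_equal_highest_column_count := by
  intro grid _ hpre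
  obtain ⟨hne, hhd, hrect⟩ := hpre
  obtain ⟨r0, rest, rfl⟩ := List.exists_cons_of_ne_nil hne
  simp only [List.headD_cons] at hhd hrect
  unfold Spec_highest_column_count highest_column_count highest_column_count_alt
  have hget : PySem.List.pyGet? (r0 :: rest) 0 = some r0 := by
    simp [PySem.List.pyGet?, PySem.List.pyIdx?]
  rw [hget]
  simp only [Option.getD_some]
  -- A's side: characterise the fold column-wise
  have hchar := main_char (r0 :: rest) (List.replicate r0.length 0) (List.replicate r0.length 0) (by simp)
  simp only [getD_replicate_zero, List.length_replicate] at hchar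
  rw [hchar, lenFold_rect (r0 :: rest) r0.length hrect]
  -- B's side: normalise the range and the inner fold
  rw [PySem.List.pyRange_one]
  simp only [sub_zero, Int.toNat_natCast, zero_add]
  have hB : ∀ (l : List Nat) (b : Int),
      (l.map (Nat.cast : Nat → Int)).foldl
        (fun best j =>
          ((r0 :: rest).foldl (fun (s : Int × Int) row =>
              (max s.1 ((if PySem.List.pyGetD row j 0 = 0 then 0 else s.2) + PySem.List.pyGetD row j 0),
               (if PySem.List.pyGetD row j 0 = 0 then 0 else s.2) + PySem.List.pyGetD row j 0)) (best, (0 : Int))).1) b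
      = l.foldl (fun b j => (cfold (r0 :: rest) j b 0).1) b := by
    intro l b
    rw [List.foldl_map]
    congr 1
    funext b j
    unfold cfold
    have hf : (fun (s : Int × Int) row =>
        (max s.1 ((if PySem.List.pyGetD row ((j : Nat) : Int) 0 = 0 then 0 else s.2) + PySem.List.pyGetD row ((j : Nat) : Int) 0),
         (if PySem.List.pyGetD row ((j : Nat) : Int) 0 = 0 then 0 else s.2) + PySem.List.pyGetD row ((j : Nat) : Int) 0))
        = (fun (p : Int × Int) row => colStep p (row.getD j 0)) := by
      funext s row
      simp [PySem.List.pyGetD_natCast, colStep]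
    rw [hf]
  rw [hB]
  rw [chain_eq_maxfold _ _ _ le_rfl]
  rw [maxfold_map]
  -- both sides are now a running max over the same list
  have hpos : 0 < r0.length := by
    cases r0 with
    | nil => simp at hhd
    | cons _ _ => simp
  obtain ⟨k, hk⟩ : ∃ k, r0.length = k + 1 := ⟨r0.length - 1, by omega⟩
  rw [hk, List.range_succ_eq_map, List.map_cons,
      PySem.List.max?_id_cons, Option.getD_some, List.foldl_cons, maxfold_shift]
  have hx : (0 : Int) ≤ (cfold (r0 :: rest) 0 0 0).1 := cfold_fst_ge _ _ _ _
  have := PySem.List.le_foldl_max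
    ((List.map (fun j => (cfold (r0 :: rest) j 0 0).1) (List.map Nat.succ (List.range k))))
    ((cfold (r0 :: rest) 0 0 0).1)
  omega
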